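-- pv_equiv track=rewrite | github.com/aws-neuron/upstreaming-to-vllm | vllm/worker/neuron_model_runner.py | _get_slots_for_speculation
-- ===== SOURCE A (Python) =====
-- from itertools import chain
-- from typing import TYPE_CHECKING, Any, Dict, List, Optional, Set, Tuple, Union
--
-- def _get_slots_for_speculation(
--
--     position,
--     block_table,
--     block_size,
--     speculation_length,
-- ) -> List[int]:
--     seq_slots = [
--         range(block_idx * block_size, (block_idx + 1) * block_size)
--         for block_idx in block_table
--     ]
--     flattened_seq_slots = list(chain(*seq_slots))
--     return flattened_seq_slots[position:position + speculation_length]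
-- ===== SOURCE B (Python) =====
-- def _get_slots_for_speculation(position, block_table, block_size, speculation_length):
--     # O(speculation_length): compute only the slots covering the requested window
--     # via integer division, instead of materialising every slot of every block.
--     total = len(block_table) * block_size if block_size > 0 else 0
--     start = position + total if position < 0 else position
--     start = min(max(start, 0), total)
--     stop = position + speculation_length
--     if stop < 0:
--         stop += total
--     stop = min(max(stop, 0), total)
--     return [block_table[i // block_size] * block_size + i % block_size
--             for i in range(start, stop)]
-- ===== Notes on version B (the rewrite author's own statement) =====
-- stated objective: faster
-- what changed: Instead of materialising every slot of every block and slicing, B normalises the slice bounds arithmetically and computes each requested slot directly as block_table[i // block_size] * block_size + i % block_size.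
import Mathlib
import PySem

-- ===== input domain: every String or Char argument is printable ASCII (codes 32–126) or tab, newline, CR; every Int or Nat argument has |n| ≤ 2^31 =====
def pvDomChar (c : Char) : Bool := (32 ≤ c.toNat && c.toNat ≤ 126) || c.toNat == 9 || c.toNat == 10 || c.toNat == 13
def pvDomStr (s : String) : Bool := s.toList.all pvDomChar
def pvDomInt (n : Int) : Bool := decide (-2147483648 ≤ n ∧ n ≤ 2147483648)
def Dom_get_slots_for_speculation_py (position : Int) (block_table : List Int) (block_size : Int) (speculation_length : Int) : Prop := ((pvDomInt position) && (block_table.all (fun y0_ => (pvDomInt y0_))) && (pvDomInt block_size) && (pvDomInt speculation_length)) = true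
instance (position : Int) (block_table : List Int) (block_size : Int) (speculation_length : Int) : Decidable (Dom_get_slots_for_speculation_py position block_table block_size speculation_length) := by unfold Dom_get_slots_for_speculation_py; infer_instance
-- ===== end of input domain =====

-- B replaces "materialise all slots of all blocks, then slice" by arithmetic slice-bound
-- normalisation plus direct per-slot computation: asymptotically faster (O(window) vs O(all slots)).

-- ===== PORT A =====
-- seq_slots = [range(b*bs, (b+1)*bs) for b in block_table]; flattened = chain(*); slice
def get_slots_for_speculation_py (position : Int) (block_table : List Int) (block_size : Int) (speculation_length : Int) : List Int :=
  let seq_slots := block_table.map (fun block_idx =>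
    PySem.List.pyRange (block_idx * block_size) ((block_idx + 1) * block_size) 1)
  let flattened_seq_slots := seq_slots.flatten
  PySem.List.slice flattened_seq_slots (some position) (some (position + speculation_length))

-- ===== PORT B =====
def get_slots_for_speculation_py_alt (position : Int) (block_table : List Int) (block_size : Int) (speculation_length : Int) : List Int :=
  let total : Int := if block_size > 0 then (block_table.length : Int) * block_size else 0
  let start0 : Int := if position < 0 then position + total else position
  let start : Int := min (max start0 0) total
  let stop0 : Int := position + speculation_length
  let stop1 : Int := if stop0 < 0 then stop0 + total else stop0
  let stop : Int := min (max stop1 0) total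
  -- block_table[i // block_size] is always a valid nonnegative index here (0 ≤ i < total)
  (PySem.List.pyRange start stop 1).map (fun i =>
    PySem.List.pyGetD block_table (PySem.Int.floordiv i block_size) 0 * block_size
      + PySem.Int.mod i block_size)

-- ===== PRECONDITION & SPEC =====
def Spec_get_slots_for_speculation_py (position : Int) (block_table : List Int) (block_size : Int) (speculation_length : Int) (out : List Int) : Prop := out = get_slots_for_speculation_py_alt position block_table block_size speculation_length
instance (position : Int) (block_table : List Int) (block_size : Int) (speculation_length : Int) (out : List Int) : Decidable (Spec_get_slots_for_speculation_py position block_table block_size speculation_length out) := by unfold Spec_get_slots_for_speculation_py; infer_instance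

-- ===== CLAIM (what is proved, stated in full; the proofs are below) =====
def Claim_equal_get_slots_for_speculation_py : Prop := ∀ (position : Int) (block_table : List Int) (block_size : Int) (speculation_length : Int), Dom_get_slots_for_speculation_py position block_table block_size speculation_length → Spec_get_slots_for_speculation_py position block_table block_size speculation_length (get_slots_for_speculation_py position block_table block_size speculation_length)

-- ===== LEMMAS AND PROOFS =====

-- the slot at flat index k (Nat form), for block size m > 0
def pvSlotF (bt : List Int) (m : Nat) (k : Nat) : Int :=
  (bt.getD (k / m) 0) * (m : Int) + ((k % m : Nat) : Int)

lemma pvSlot_cast (bt : List Int) (m : Nat) (k : Nat) :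
    PySem.List.pyGetD bt (PySem.Int.floordiv (k : Int) (m : Int)) 0 * (m : Int)
      + PySem.Int.mod (k : Int) (m : Int) = pvSlotF bt m k := by
  rw [PySem.Int.floordiv_natCast, PySem.Int.mod_natCast, PySem.List.pyGetD_natCast]
  rfl

lemma pvFlatten_eq (bt : List Int) (m : Nat) (hm : 0 < m) :
    (bt.map (fun b => PySem.List.pyRange (b * (m : Int)) ((b + 1) * (m : Int)) 1)).flatten
      = (List.range (bt.length * m)).map (pvSlotF bt m) := by
  induction bt with
  | nil => simp
  | cons b rest ih =>
    have hd : ((b + 1) * (m : Int) - b * (m : Int)) = (m : Int) := by ring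
    have hlen : (b :: rest).length * m = m + rest.length * m := by
      simp [List.length_cons]; ring
    rw [List.map_cons, List.flatten_cons, ih, PySem.List.pyRange_one, hd, Int.toNat_natCast,
        hlen, List.range_add, List.map_append, List.map_map]
    congr 1
    · apply List.map_congr_left
      intro k hk
      rw [List.mem_range] at hk
      simp [pvSlotF, Nat.div_eq_of_lt hk, Nat.mod_eq_of_lt hk]
    · apply List.map_congr_left
      intro k hk
      simp only [Function.comp_apply, pvSlotF]
      have h1 : (m + k) / m = k / m + 1 := by
        rw [Nat.add_comm, Nat.add_div_right _ hm]
      have h2 : (m + k) % m = k % m := by rw [Nat.add_comm, Nat.add_mod_right]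
      rw [h1, h2, List.getD_cons_succ]

-- the two ports agree on every input
lemma pvPorts_eq (position : Int) (bt : List Int) (bs sl : Int) :
    get_slots_for_speculation_py position bt bs sl
      = get_slots_for_speculation_py_alt position bt bs sl := by
  by_cases hbs : bs > 0
  · obtain ⟨m, hm, rfl⟩ : ∃ m : Nat, 0 < m ∧ bs = (m : Int) := ⟨bs.toNat, by omega, by omega⟩
    set L := bt.length * m with hL
    set s := PySem.List.clampIdx L position with hs
    set t := PySem.List.clampIdx L (position + sl) with ht
    have hsL : s ≤ L := by rw [hs]; unfold PySem.List.clampIdx; split_ifs <;> omega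
    have htL : t ≤ L := by rw [ht]; unfold PySem.List.clampIdx; split_ifs <;> omega
    have hA : get_slots_for_speculation_py position bt (m : Int) sl
        = (List.range (t - s)).map (fun k => pvSlotF bt m (s + k)) := by
      have h0 : get_slots_for_speculation_py position bt (m : Int) sl
          = PySem.List.slice ((bt.map (fun b =>
              PySem.List.pyRange (b * (m : Int)) ((b + 1) * (m : Int)) 1)).flatten)
              (some position) (some (position + sl)) := rfl
      rw [h0, pvFlatten_eq bt m hm]
      have hslice : PySem.List.slice ((List.range L).map (pvSlotF bt m))
            (some position) (some (position + sl))
          = (((List.range L).map (pvSlotF bt m)).drop s).take (t - s) := by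
        simp [PySem.List.slice, hs, ht, hL]
      rw [hslice]
      have hrange : List.range L = List.range s ++ (List.range (L - s)).map (fun k => s + k) := by
        rw [← List.range_add]; congr 1; omega
      rw [hrange, List.map_append,
          List.drop_left' (by simp : ((List.range s).map (pvSlotF bt m)).length = s),
          List.map_map, ← List.map_take, List.take_range,
          show min (t - s) (L - s) = t - s by omega]
      rfl
    have hB : get_slots_for_speculation_py_alt position bt (m : Int) sl
        = (List.range (t - s)).map (fun k => pvSlotF bt m (s + k)) := by
      have h0 : get_slots_for_speculation_py_alt position bt (m : Int) sl
          = (PySem.List.pyRange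
              (min (max (if position < 0 then position + ((bt.length : Int) * m) else position) 0)
                ((bt.length : Int) * m))
              (min (max (if position + sl < 0 then position + sl + ((bt.length : Int) * m)
                  else position + sl) 0) ((bt.length : Int) * m)) 1).map (fun i =>
            PySem.List.pyGetD bt (PySem.Int.floordiv i (m : Int)) 0 * (m : Int)
              + PySem.Int.mod i (m : Int)) := by
        show get_slots_for_speculation_py_alt position bt (m : Int) sl = _
        unfold get_slots_for_speculation_py_alt
        rw [if_pos hbs]
      have hstart : (min (max (if position < 0 then position + ((bt.length : Int) * m)
            else position) 0) ((bt.length : Int) * m)) = (s : Int) := by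
        rw [hs, hL]; unfold PySem.List.clampIdx
        split_ifs <;> push_cast <;> omega
      have hstop : (min (max (if position + sl < 0 then position + sl + ((bt.length : Int) * m)
            else position + sl) 0) ((bt.length : Int) * m)) = (t : Int) := by
        rw [ht, hL]; unfold PySem.List.clampIdx
        split_ifs <;> push_cast <;> omega
      rw [h0, hstart, hstop, PySem.List.pyRange_one,
          show ((t : Int) - (s : Int)).toNat = t - s by omega, List.map_map]
      apply List.map_congr_left
      intro k _
      show PySem.List.pyGetD bt (PySem.Int.floordiv ((s : Int) + (k : Int)) (m : Int)) 0 * (m : Int)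
            + PySem.Int.mod ((s : Int) + (k : Int)) (m : Int) = pvSlotF bt m (s + k)
      rw [show (s : Int) + (k : Int) = ((s + k : Nat) : Int) by push_cast; ring,
          pvSlot_cast bt m (s + k)]
    rw [hA, hB]
  · have hA : get_slots_for_speculation_py position bt bs sl = [] := by
      have h0 : get_slots_for_speculation_py position bt bs sl
          = PySem.List.slice ((bt.map (fun b =>
              PySem.List.pyRange (b * bs) ((b + 1) * bs) 1)).flatten)
              (some position) (some (position + sl)) := rfl
      have hempty : (bt.map (fun b => PySem.List.pyRange (b * bs) ((b + 1) * bs) 1)).flatten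
          = ([] : List Int) := by
        rw [List.flatten_eq_nil_iff]
        intro xs hxs
        rw [List.mem_map] at hxs
        obtain ⟨b, -, rfl⟩ := hxs
        rw [PySem.List.pyRange_one, show ((b + 1) * bs - b * bs) = bs by ring,
            show bs.toNat = 0 by omega]
        simp
      rw [h0, hempty]
      simp [PySem.List.slice]
    have hB : get_slots_for_speculation_py_alt position bt bs sl = [] := by
      have h0 : get_slots_for_speculation_py_alt position bt bs sl
          = (PySem.List.pyRange
              (min (max (if position < 0 then position + 0 else position) 0) 0)
              (min (max (if position + sl < 0 then position + sl + 0
                  else position + sl) 0) 0) 1).map (fun i =>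
            PySem.List.pyGetD bt (PySem.Int.floordiv i bs) 0 * bs
              + PySem.Int.mod i bs) := by
        show get_slots_for_speculation_py_alt position bt bs sl = _
        unfold get_slots_for_speculation_py_alt
        rw [if_neg hbs]
      rw [h0, show ∀ x : Int, min (max x 0) (0 : Int) = 0 from fun x => by omega,
          show ∀ x : Int, min (max x 0) (0 : Int) = 0 from fun x => by omega,
          PySem.List.pyRange_one]
      simp
    rw [hA, hB]

-- ===== VERDICT (by name: the statement is the Claim_ definition above) =====
theorem get_slots_for_speculation_py_spec : Claim_equal_get_slots_for_speculation_py := by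
  intro position block_table block_size speculation_length _
  exact pvPorts_eq position block_table block_size speculation_length
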